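-- pv_equiv track=rewrite | github.com/coluich/Python_Skatches | generatore.py | generate_passwords
-- ===== SOURCE A (Python) =====
-- import itertools
-- import string
--
-- def generate_passwords(length, include_characters):
--     characters = ""
--
--     if '1' in include_characters:
--         characters += string.digits
--     if '2' in include_characters:
--         characters += string.ascii_letters
--     if '3' in include_characters:
--         characters += string.punctuation
--
--     passwords = itertools.product(characters, repeat=length)
--     passwords = [''.join(p) for p in passwords]
--     return passwords
-- ===== SOURCE B (Python) =====
-- import string
--
-- def generate_passwords(length, include_characters):
--     characters = ""
--
--     if '1' in include_characters:
--         characters += string.digits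
--     if '2' in include_characters:
--         characters += string.ascii_letters
--     if '3' in include_characters:
--         characters += string.punctuation
--
--     # divide and conquer: all strings of length n are all pairs
--     # (prefix of length n//2) + (suffix of length n - n//2)
--     def gen(n):
--         if n == 0:
--             return ['']
--         if n == 1:
--             return list(characters)
--         half = n // 2
--         left = gen(half)
--         right = gen(n - half)
--         return [l + r for l in left for r in right]
--
--     return gen(length)
-- ===== Notes on version B (the rewrite author's own statement) =====
-- stated objective: alternative
-- what changed: Replaces itertools.product's per-position Cartesian expansion by divide-and-conquer: recursively build all passwords of length n//2 and of length n - n//2 and concatenate every prefix with every suffix, which preserves the lexicographic order.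
import Mathlib
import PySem

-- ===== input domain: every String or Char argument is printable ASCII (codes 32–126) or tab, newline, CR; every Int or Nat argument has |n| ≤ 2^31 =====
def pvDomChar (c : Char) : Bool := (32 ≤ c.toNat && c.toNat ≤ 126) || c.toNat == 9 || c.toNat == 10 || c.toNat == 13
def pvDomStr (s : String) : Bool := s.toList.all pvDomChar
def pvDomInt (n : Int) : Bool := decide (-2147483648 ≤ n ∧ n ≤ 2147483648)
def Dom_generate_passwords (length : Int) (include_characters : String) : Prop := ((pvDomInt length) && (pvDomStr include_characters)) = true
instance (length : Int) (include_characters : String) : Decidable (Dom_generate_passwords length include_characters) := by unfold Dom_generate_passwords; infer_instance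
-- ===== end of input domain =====

-- B replaces itertools.product's per-position Cartesian expansion by divide and
-- conquer: concatenate all prefixes of length n//2 with all suffixes of length
-- n - n//2, recursively (objective: alternative).

-- ===== PORT A =====
-- the character-set-building prefix, identical in both Pythons
def pvChars (include_characters : String) : List Char :=
  let characters : List Char := []
  let characters := if PySem.Str.isIn "1" include_characters then
    characters ++ "0123456789".toList else characters
  let characters := if PySem.Str.isIn "2" include_characters then
    characters ++ "abcdefghijklmnopqrstuvwxyzABCDEFGHIJKLMNOPQRSTUVWXYZ".toList else characters
  let characters := if PySem.Str.isIn "3" include_characters then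
    characters ++ "!\"#$%&'()*+,-./:;<=>?@[\\]^_`{|}~".toList else characters
  characters

-- itertools.product(characters, repeat=n): tuples in lexicographic order, first
-- position outermost (exact for n ≥ 0; Python raises ValueError for n < 0, excluded by Pre_)
def pvProduct (cs : List Char) : Nat → List (List Char)
  | 0 => [[]]
  | n + 1 => cs.flatMap (fun c => (pvProduct cs n).map (fun t => c :: t))

def generate_passwords (length : Int) (include_characters : String) : List String :=
  let characters := pvChars include_characters
  let passwords := pvProduct characters length.toNat
  passwords.map (fun p => String.ofList p)   -- ''.join(p)

-- ===== PORT B =====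
-- gen(n): all strings of length n over characters, divide and conquer:
-- every string of length n is (prefix of length n//2) + (suffix of length n - n//2)
def pvGen (cs : List Char) : Nat → List (List Char)
  | 0 => [[]]
  | 1 => cs.map (fun c => [c])
  | n + 2 =>
    let half := (n + 2) / 2
    let left := pvGen cs half
    let right := pvGen cs (n + 2 - half)
    left.flatMap (fun l => right.map (fun r => l ++ r))
decreasing_by all_goals omega

def generate_passwords_alt (length : Int) (include_characters : String) : List String :=
  let characters := pvChars include_characters
  -- return gen(length)  (length ≥ 0 under Pre_)
  (pvGen characters length.toNat).map (fun p => String.ofList p)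

-- ===== PRECONDITION & SPEC =====
-- Pre_ excludes only negative length, where Python A raises ValueError
-- (itertools.product with repeat < 0) and Python B also raises.
def Pre_generate_passwords (length : Int) (include_characters : String) : Prop :=
  0 ≤ length
instance (length : Int) (include_characters : String) : Decidable (Pre_generate_passwords length include_characters) := by unfold Pre_generate_passwords; infer_instance
def pvWitness_generate_passwords : Int × String := (2, "1")

def Spec_generate_passwords (length : Int) (include_characters : String) (out : List String) : Prop := out = generate_passwords_alt length include_characters
instance (length : Int) (include_characters : String) (out : List String) : Decidable (Spec_generate_passwords length include_characters out) := by unfold Spec_generate_passwords; infer_instance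

-- ===== CLAIM (what is proved, stated in full; the proofs are below) =====
def Claim_equal_generate_passwords : Prop := ∀ (length : Int) (include_characters : String), Dom_generate_passwords length include_characters → Pre_generate_passwords length include_characters → Spec_generate_passwords length include_characters (generate_passwords length include_characters)

-- ===== LEMMAS AND PROOFS =====

-- the product of length a+b is every product of length a glued to every product of length b
lemma pvProduct_add (cs : List Char) (a b : Nat) :
    pvProduct cs (a + b)
      = (pvProduct cs a).flatMap (fun l => (pvProduct cs b).map (fun r => l ++ r)) := by
  induction a with
  | zero => simp [pvProduct]
  | succ a ih =>
    have h : a + 1 + b = (a + b) + 1 := by omega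
    rw [h, pvProduct, ih, pvProduct]
    simp [List.map_flatMap, List.flatMap_assoc, List.flatMap_map, List.map_map,
      Function.comp_def]

-- the one-character products are the singleton strings
lemma flatMap_singleton_list (cs : List Char) :
    List.flatMap (fun c => [[c]]) cs = cs.map (fun c => [c]) := by
  induction cs <;> simp_all

-- the divide-and-conquer build equals the Cartesian product, in the same order
lemma pvGen_eq_product (cs : List Char) (n : Nat) : pvGen cs n = pvProduct cs n := by
  induction n using Nat.strong_induction_on with
  | _ n ih =>
    match n with
    | 0 => simp [pvGen, pvProduct]
    | 1 => simp [pvGen, pvProduct, flatMap_singleton_list]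
    | n + 2 =>
      rw [pvGen]
      have h1 : (n + 2) / 2 < n + 2 := by omega
      have h2 : n + 2 - (n + 2) / 2 < n + 2 := by omega
      rw [ih _ h1, ih _ h2]
      have h3 : (n + 2) / 2 + (n + 2 - (n + 2) / 2) = n + 2 := by omega
      rw [← pvProduct_add, h3]

-- ===== VERDICT (by name: the statement is the Claim_ definition above) =====
theorem generate_passwords_spec : Claim_equal_generate_passwords := by
  intro length include_characters _ _
  simp only [Spec_generate_passwords, generate_passwords, generate_passwords_alt,
    pvGen_eq_product]
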